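-- pv_equiv track=rewrite | github.com/kyletbuzbee/kl-crm | crm-blueprint.py | _get_code_context
-- ===== SOURCE A (Python) =====
-- from typing import Dict, List, Set, Tuple, Optional, Any
--
-- def _get_code_context(content: str, line_num: int, lines: List[str], context_lines: int = 3) -> str:
--     """Get code context around a line number for better analysis"""
--     start_line = max(0, line_num - context_lines - 1)
--     end_line = min(len(lines), line_num + context_lines)
--
--     context_lines_list = []
--     for i in range(start_line, end_line):
--         if i == line_num - 1:  # Mark the target line
--             context_lines_list.append(f">>> {lines[i]}")
--         else:
--             context_lines_list.append(lines[i])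
--
--     return '\n'.join(context_lines_list)
-- ===== SOURCE B (Python) =====
-- def _get_code_context(content: str, line_num: int, lines, context_lines: int = 3) -> str:
--     """Divide-and-conquer: build the context string by recursively joining the
--     two halves of the window with '\n' (no per-element loop, no list+join)."""
--     start_line = max(0, line_num - context_lines - 1)
--     end_line = min(len(lines), line_num + context_lines)
--     if end_line <= start_line:
--         return ''
--
--     def seg(lo, hi):  # joined text of lines[lo:hi], requires lo < hi
--         if hi - lo == 1:
--             return f">>> {lines[lo]}" if lo == line_num - 1 else lines[lo]
--         mid = (lo + hi) // 2
--         return seg(lo, mid) + '\n' + seg(mid, hi)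
--
--     return seg(start_line, end_line)
-- ===== Notes on version B (the rewrite author's own statement) =====
-- stated objective: alternative
-- what changed: Replaces A's linear index loop that appends into a list and joins it by a divide-and-conquer recursion that splits the window at its midpoint and concatenates the joined halves with a newline, marking the target line at the singleton base case.
import Mathlib
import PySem

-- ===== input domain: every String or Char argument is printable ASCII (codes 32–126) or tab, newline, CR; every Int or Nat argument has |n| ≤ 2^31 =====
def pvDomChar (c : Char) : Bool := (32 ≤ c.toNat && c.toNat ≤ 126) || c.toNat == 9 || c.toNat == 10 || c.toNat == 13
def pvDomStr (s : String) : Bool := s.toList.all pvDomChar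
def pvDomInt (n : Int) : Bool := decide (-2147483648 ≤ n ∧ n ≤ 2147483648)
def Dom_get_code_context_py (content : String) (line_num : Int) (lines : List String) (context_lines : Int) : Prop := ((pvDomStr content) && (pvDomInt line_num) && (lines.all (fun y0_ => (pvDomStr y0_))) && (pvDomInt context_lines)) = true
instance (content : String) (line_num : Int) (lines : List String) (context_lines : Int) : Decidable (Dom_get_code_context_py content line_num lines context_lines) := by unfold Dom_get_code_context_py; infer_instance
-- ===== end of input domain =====

-- B builds the context string by divide-and-conquer: split the window at its midpoint and join the halves with a newline (no per-element loop, no list+join); alternative algorithm, same practical cost.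

-- ===== PORT A =====
def get_code_context_py (content : String) (line_num : Int) (lines : List String) (context_lines : Int) : String :=
  let start_line : Int := max 0 (line_num - context_lines - 1)
  let end_line : Int := min (lines.length : Int) (line_num + context_lines)
  let context_lines_list : List String :=
    (PySem.List.pyRange start_line end_line 1).foldl
      (fun acc i =>
        if i = line_num - 1 then
          acc ++ [">>> " ++ PySem.List.pyGetD lines i ""]
        else
          acc ++ [PySem.List.pyGetD lines i ""]) []
  PySem.Str.join "\n" context_lines_list

-- ===== PORT B =====
-- Source B's inner 'seg': divide-and-conquer join of lines[lo:hi]; fuel only makes the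
-- recursion structural (call sites supply enough fuel, the fuel-0 arm is unreachable)
def pvSeg (lines : List String) (line_num : Int) : Nat → Int → Int → String
  | fuel, lo, hi =>
    if hi - lo = 1 then
      if lo = line_num - 1 then ">>> " ++ PySem.List.pyGetD lines lo "" else PySem.List.pyGetD lines lo ""
    else
      match fuel with
      | 0 => ""
      | fuel + 1 =>
        let mid := PySem.Int.floordiv (lo + hi) 2
        pvSeg lines line_num fuel lo mid ++ "\n" ++ pvSeg lines line_num fuel mid hi

def get_code_context_py_alt (content : String) (line_num : Int) (lines : List String) (context_lines : Int) : String :=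
  let start_line : Int := max 0 (line_num - context_lines - 1)
  let end_line : Int := min (lines.length : Int) (line_num + context_lines)
  if end_line ≤ start_line then ""
  else pvSeg lines line_num (end_line - start_line).toNat start_line end_line

-- ===== PRECONDITION & SPEC =====
def Spec_get_code_context_py (content : String) (line_num : Int) (lines : List String) (context_lines : Int) (out : String) : Prop := out = get_code_context_py_alt content line_num lines context_lines
instance (content : String) (line_num : Int) (lines : List String) (context_lines : Int) (out : String) : Decidable (Spec_get_code_context_py content line_num lines context_lines out) := by unfold Spec_get_code_context_py; infer_instance

-- ===== CLAIM (what is proved, stated in full; the proofs are below) =====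
def Claim_equal_get_code_context_py : Prop := ∀ (content : String) (line_num : Int) (lines : List String) (context_lines : Int), Dom_get_code_context_py content line_num lines context_lines → Spec_get_code_context_py content line_num lines context_lines (get_code_context_py content line_num lines context_lines)

-- ===== LEMMAS AND PROOFS =====

-- Str-level join facts, derived from the Chars-level lemmas
theorem pvJoin_singleton (sep x : String) : PySem.Str.join sep [x] = x := by
  apply String.toList_inj.mp
  rw [PySem.Str.toList_join]
  simp [PySem.Chars.join_singleton]

theorem pvJoin_cons_of_ne_nil (sep x : String) (xs : List String) (h : xs ≠ []) :
    PySem.Str.join sep (x :: xs) = x ++ sep ++ PySem.Str.join sep xs := by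
  cases xs with
  | nil => exact absurd rfl h
  | cons q rest =>
    apply String.toList_inj.mp
    rw [PySem.Str.toList_join, String.toList_append, String.toList_append, PySem.Str.toList_join]
    simp [PySem.Chars.join_cons_cons]

-- A's loop body as a map over the range
theorem pvA_list_eq_map (t : Int) (lines : List String) (s e : Int) :
    (PySem.List.pyRange s e 1).foldl
      (fun acc i =>
        if i = t then acc ++ [">>> " ++ PySem.List.pyGetD lines i ""]
        else acc ++ [PySem.List.pyGetD lines i ""]) []
    = (PySem.List.pyRange s e 1).map
        (fun i => if i = t then ">>> " ++ PySem.List.pyGetD lines i "" else PySem.List.pyGetD lines i "") := by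
  rw [PySem.List.foldl_congr_mem (g := fun acc i =>
        acc ++ [if i = t then ">>> " ++ PySem.List.pyGetD lines i "" else PySem.List.pyGetD lines i ""])]
  · rw [PySem.List.foldl_append_singleton_eq_map]; simp
  · intro acc x _; split <;> rfl

-- Str-level join splits at any point with nonempty halves
theorem pvJoin_append (sep : String) (as bs : List String) (ha : as ≠ []) (hb : bs ≠ []) :
    PySem.Str.join sep (as ++ bs) = PySem.Str.join sep as ++ sep ++ PySem.Str.join sep bs := by
  induction as with
  | nil => exact absurd rfl ha
  | cons x as' ih =>
    cases as' with
    | nil =>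
      simp only [List.nil_append, List.cons_append]
      rw [pvJoin_cons_of_ne_nil sep x bs hb, pvJoin_singleton]
    | cons y rest =>
      have h2 : (y :: rest : List String) ≠ [] := by simp
      calc PySem.Str.join sep ((x :: y :: rest) ++ bs)
          = PySem.Str.join sep (x :: (y :: (rest ++ bs))) := by simp
        _ = x ++ sep ++ PySem.Str.join sep (y :: (rest ++ bs)) :=
            pvJoin_cons_of_ne_nil sep x _ (by simp)
        _ = x ++ sep ++ PySem.Str.join sep ((y :: rest) ++ bs) := by simp
        _ = x ++ sep ++ (PySem.Str.join sep (y :: rest) ++ sep ++ PySem.Str.join sep bs) := by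
            rw [ih h2]
        _ = (x ++ sep ++ PySem.Str.join sep (y :: rest)) ++ sep ++ PySem.Str.join sep bs := by
            simp [String.append_assoc]
        _ = PySem.Str.join sep (x :: y :: rest) ++ sep ++ PySem.Str.join sep bs := by
            rw [pvJoin_cons_of_ne_nil sep x (y :: rest) h2]

-- B's divide-and-conquer computes the joined map over the window, given enough fuel
theorem pvSeg_eq (lines : List String) (ln : Int) :
    ∀ fuel : Nat, ∀ lo hi : Int, lo < hi → (hi - lo).toNat ≤ fuel + 1 →
      pvSeg lines ln fuel lo hi =
        PySem.Str.join "\n" ((PySem.List.pyRange lo hi 1).map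
          (fun j => if j = ln - 1 then ">>> " ++ PySem.List.pyGetD lines j "" else PySem.List.pyGetD lines j "")) := by
  intro fuel
  induction fuel with
  | zero =>
    intro lo hi hlt hf
    have h1 : hi - lo = 1 := by omega
    unfold pvSeg
    rw [if_pos h1]
    have : hi = lo + 1 := by omega
    rw [this, PySem.List.pyRange_one_singleton, List.map_singleton, pvJoin_singleton]
  | succ n ih =>
    intro lo hi hlt hf
    unfold pvSeg
    by_cases h1 : hi - lo = 1
    · rw [if_pos h1]
      have : hi = lo + 1 := by omega
      rw [this, PySem.List.pyRange_one_singleton, List.map_singleton, pvJoin_singleton]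
    · rw [if_neg h1]
      simp only []
      have hmid : PySem.Int.floordiv (lo + hi) 2 = (lo + hi) / 2 := by
        simp [PySem.Int.floordiv, Int.fdiv_eq_ediv]
      rw [hmid]
      rw [ih lo ((lo + hi) / 2) (by omega) (by omega),
          ih ((lo + hi) / 2) hi (by omega) (by omega),
          PySem.List.pyRange_one_append lo ((lo + hi) / 2) hi (by omega) (by omega),
          List.map_append,
          pvJoin_append "\n" _ _ ?_ ?_]
      · intro hnil
        have := PySem.List.length_pyRange_one lo ((lo + hi) / 2)
        rw [List.map_eq_nil_iff.mp hnil] at this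
        simp at this; omega
      · intro hnil
        have := PySem.List.length_pyRange_one ((lo + hi) / 2) hi
        rw [List.map_eq_nil_iff.mp hnil] at this
        simp at this; omega

-- ===== VERDICT (by name: the statement is the Claim_ definition above) =====
theorem get_code_context_py_spec : Claim_equal_get_code_context_py := by
  intro content line_num lines context_lines _
  unfold Spec_get_code_context_py get_code_context_py get_code_context_py_alt
  simp only []
  set s : Int := max 0 (line_num - context_lines - 1) with hsdef
  set e : Int := min (lines.length : Int) (line_num + context_lines) with hedef
  rw [pvA_list_eq_map]
  by_cases hemp : e ≤ s
  · rw [if_pos hemp, PySem.List.pyRange_one_eq_nil hemp]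
    rfl
  · rw [if_neg hemp, pvSeg_eq lines line_num (e - s).toNat s e (by omega) (by omega)]
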